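-- pv_equiv track=rewrite | github.com/clysto/dot11 | dot11decoder.py | descramble
-- ===== SOURCE A (Python) =====
-- def descramble(bits):
--     x = [0] * 7
--     x[0] = bits[2] ^ bits[6]
--     x[1] = bits[1] ^ bits[5]
--     x[2] = bits[0] ^ bits[4]
--     x[3] = x[0] ^ bits[3]
--     x[4] = x[1] ^ bits[2]
--     x[5] = x[2] ^ bits[1]
--     x[6] = x[3] ^ bits[0]
--
--     out_bits = []
--     for _, b in enumerate(bits):
--         feedback = x[6] ^ x[3]
--         out_bits.append(feedback ^ b)
--         x = [feedback] + x[:-1]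
--
--     return out_bits
-- ===== SOURCE B (Python) =====
-- # Simpler: no 7-element shift register and no hand-wired initialisation; the LFSR seed
-- # is just the first 7 scrambled bits, and every later feedback is f[n-4] ^ f[n-7].
-- def descramble(bits):
--     f = [bits[n] for n in range(7)]  # scrambler seed (needs at least 7 bits, like A)
--     out = [0] * 7                    # the seed descrambles to zeros
--     for n in range(7, len(bits)):
--         fn = f[n - 4] ^ f[n - 7]
--         f.append(fn)
--         out.append(fn ^ bits[n])
--     return out
-- ===== Notes on version B (the rewrite author's own statement) =====
-- stated objective: simpler
-- what changed: B drops A's 7-element shift register and its hand-wired initialisation block, instead growing the list of feedback values directly from the recurrence f[n]=bits[n] (n<7) / f[n-4]^f[n-7] and xoring each feedback with the corresponding input bit; Pre_ excludes inputs with fewer than 7 elements, on which A raises IndexError (its initialisation indexes the seventh element).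
import Mathlib
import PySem

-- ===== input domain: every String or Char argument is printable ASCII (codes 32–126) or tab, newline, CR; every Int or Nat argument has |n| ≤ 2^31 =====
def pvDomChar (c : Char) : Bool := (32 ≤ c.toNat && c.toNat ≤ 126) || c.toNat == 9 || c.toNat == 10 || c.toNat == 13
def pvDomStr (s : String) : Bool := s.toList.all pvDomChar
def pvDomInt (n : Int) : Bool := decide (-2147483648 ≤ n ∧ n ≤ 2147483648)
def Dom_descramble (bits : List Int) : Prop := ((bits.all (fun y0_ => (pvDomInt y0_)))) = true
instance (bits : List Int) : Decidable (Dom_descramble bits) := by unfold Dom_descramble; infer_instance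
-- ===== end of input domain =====

-- B replaces A's 7-element shift register and hand-wired initialisation with the
-- feedback-sequence recurrence, built as a growing list; equivalence of the return
-- values is proved on inputs with at least 7 elements (A raises IndexError below that).

-- ===== PORT A =====
def descramble (bits : List Int) : List Int :=
  -- x[0..6] initialisation; bits[i] is PySem.List.pyGetD (in range under Pre_)
  let g : Int → Int := fun i => PySem.List.pyGetD bits i 0
  let x0 := PySem.Int.bxor (g 2) (g 6)
  let x1 := PySem.Int.bxor (g 1) (g 5)
  let x2 := PySem.Int.bxor (g 0) (g 4)
  let x3 := PySem.Int.bxor x0 (g 3)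
  let x4 := PySem.Int.bxor x1 (g 2)
  let x5 := PySem.Int.bxor x2 (g 1)
  let x6 := PySem.Int.bxor x3 (g 0)
  -- for _, b in enumerate(bits): … ; x = [feedback] + x[:-1]  (x[:-1] = dropLast)
  let st := bits.foldl
    (fun (st : List Int × List Int) b =>
      let x := st.1
      let feedback := PySem.Int.bxor (PySem.List.pyGetD x 6 0) (PySem.List.pyGetD x 3 0)
      (feedback :: x.dropLast, st.2 ++ [PySem.Int.bxor feedback b]))
    ([x0, x1, x2, x3, x4, x5, x6], [])
  st.2

-- ===== PORT B =====
def descramble_alt (bits : List Int) : List Int :=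
  -- f = [bits[n] for n in range(7)]
  let f0 := (PySem.List.pyRange 0 7 1).map (fun n => PySem.List.pyGetD bits n 0)
  -- out = [0] * 7
  let out0 : List Int := List.replicate 7 0
  -- for n in range(7, len(bits)): …
  let st := (PySem.List.pyRange 7 (bits.length : Int) 1).foldl
    (fun (st : List Int × List Int) n =>
      let fn := PySem.Int.bxor (PySem.List.pyGetD st.1 (n - 4) 0) (PySem.List.pyGetD st.1 (n - 7) 0)
      (st.1 ++ [fn], st.2 ++ [PySem.Int.bxor fn (PySem.List.pyGetD bits n 0)]))
    (f0, out0)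
  st.2

-- ===== PRECONDITION & SPEC =====
-- A indexes the seventh element during initialisation, so it raises IndexError when len(bits) < 7.
def Pre_descramble (bits : List Int) : Prop := 7 ≤ bits.length
instance (bits : List Int) : Decidable (Pre_descramble bits) := by unfold Pre_descramble; infer_instance
def pvWitness_descramble : List Int := [1, 0, 1, 1, 0, 0, 1, 0]

def Spec_descramble (bits : List Int) (out : List Int) : Prop := out = descramble_alt bits
instance (bits : List Int) (out : List Int) : Decidable (Spec_descramble bits out) := by unfold Spec_descramble; infer_instance

-- ===== CLAIM (what is proved, stated in full; the proofs are below) =====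
def Claim_equal_descramble : Prop := ∀ (bits : List Int), Dom_descramble bits → Pre_descramble bits → Spec_descramble bits (descramble bits)

-- ===== LEMMAS AND PROOFS =====


-- the feedback sequence, shifted by 7: pvG bits k is A's register value;
-- pvG bits (n+7) is the feedback emitted at step n.
def pvG (bits : List Int) : Nat → Int
  | 0 => PySem.Int.bxor (PySem.Int.bxor (PySem.Int.bxor (PySem.List.pyGetD bits 2 0) (PySem.List.pyGetD bits 6 0)) (PySem.List.pyGetD bits 3 0)) (PySem.List.pyGetD bits 0 0)
  | 1 => PySem.Int.bxor (PySem.Int.bxor (PySem.List.pyGetD bits 0 0) (PySem.List.pyGetD bits 4 0)) (PySem.List.pyGetD bits 1 0)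
  | 2 => PySem.Int.bxor (PySem.Int.bxor (PySem.List.pyGetD bits 1 0) (PySem.List.pyGetD bits 5 0)) (PySem.List.pyGetD bits 2 0)
  | 3 => PySem.Int.bxor (PySem.Int.bxor (PySem.List.pyGetD bits 2 0) (PySem.List.pyGetD bits 6 0)) (PySem.List.pyGetD bits 3 0)
  | 4 => PySem.Int.bxor (PySem.List.pyGetD bits 0 0) (PySem.List.pyGetD bits 4 0)
  | 5 => PySem.Int.bxor (PySem.List.pyGetD bits 1 0) (PySem.List.pyGetD bits 5 0)
  | 6 => PySem.Int.bxor (PySem.List.pyGetD bits 2 0) (PySem.List.pyGetD bits 6 0)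
  | (n+7) => PySem.Int.bxor (pvG bits n) (pvG bits (n+3))

-- the common reference output: entry k is  G(k+7) ^ b
def pvOut (bits : List Int) (k : Nat) : List Int → List Int
  | [] => []
  | b :: l => PySem.Int.bxor (pvG bits (k+7)) b :: pvOut bits (k+1) l


-- xor cancellation on PySem's Python-exact Int xor
theorem pv_bxor_cancel_left (a b : Int) : PySem.Int.bxor a (PySem.Int.bxor a b) = b := by
  have key : ∀ (m n : Nat), m ^^^ (m ^^^ n) = n := fun m n => by
    rw [← Nat.xor_assoc, Nat.xor_self, Nat.zero_xor]
  rcases le_or_gt (0:Int) a with ha | ha <;> rcases le_or_gt (0:Int) b with hb | hb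
  · have hab : PySem.Int.bxor a b = ((a.toNat ^^^ b.toNat : Nat) : Int) := by
      simp only [PySem.Int.bxor, if_pos ha, if_pos hb]
    rw [hab]
    simp only [PySem.Int.bxor, if_pos ha, if_pos (Int.natCast_nonneg _), Int.toNat_natCast, key]
    exact Int.toNat_of_nonneg hb
  · have hab : PySem.Int.bxor a b = -((a.toNat ^^^ (-b - 1).toNat : Nat) : Int) - 1 := by
      simp only [PySem.Int.bxor, if_pos ha, if_neg (not_le.mpr hb)]
    rw [hab]
    simp only [PySem.Int.bxor, if_pos ha,
      if_neg (by omega : ¬ (0:Int) ≤ -((a.toNat ^^^ (-b - 1).toNat : Nat) : Int) - 1)]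
    have h2 : (-(-(((a.toNat ^^^ (-b - 1).toNat : Nat)) : Int) - 1) - 1) = ((a.toNat ^^^ (-b - 1).toNat : Nat) : Int) := by ring
    rw [h2, Int.toNat_natCast, key]
    omega
  · have hab : PySem.Int.bxor a b = -(((-a - 1).toNat ^^^ b.toNat : Nat) : Int) - 1 := by
      simp only [PySem.Int.bxor, if_neg (not_le.mpr ha), if_pos hb]
    rw [hab]
    simp only [PySem.Int.bxor, if_neg (not_le.mpr ha),
      if_neg (by omega : ¬ (0:Int) ≤ -((((-a - 1).toNat ^^^ b.toNat : Nat)) : Int) - 1)]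
    have h2 : (-(-((((-a - 1).toNat ^^^ b.toNat : Nat)) : Int) - 1) - 1) = (((-a - 1).toNat ^^^ b.toNat : Nat) : Int) := by ring
    rw [h2, Int.toNat_natCast, key]
    exact Int.toNat_of_nonneg hb
  · have hab : PySem.Int.bxor a b = (((-a - 1).toNat ^^^ (-b - 1).toNat : Nat) : Int) := by
      simp only [PySem.Int.bxor, if_neg (not_le.mpr ha), if_neg (not_le.mpr hb)]
    rw [hab]
    simp only [PySem.Int.bxor, if_neg (not_le.mpr ha), if_pos (Int.natCast_nonneg _),
      Int.toNat_natCast, key]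
    omega

theorem pv_bxor_cancel (a b : Int) : PySem.Int.bxor (PySem.Int.bxor a b) a = b := by
  rw [PySem.Int.bxor_comm]
  exact pv_bxor_cancel_left a b

theorem pvG_seed (bits : List Int) (i : Nat) (h : i < 7) :
    pvG bits (i+7) = PySem.List.pyGetD bits (i : Int) 0 := by
  have h0 : pvG bits 7 = PySem.List.pyGetD bits 0 0 := by
    rw [show pvG bits 7 = PySem.Int.bxor (pvG bits 0) (pvG bits 3) from rfl]
    simp only [pvG]
    exact pv_bxor_cancel _ _
  have h1 : pvG bits 8 = PySem.List.pyGetD bits 1 0 := by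
    rw [show pvG bits 8 = PySem.Int.bxor (pvG bits 1) (pvG bits 4) from rfl]
    simp only [pvG]
    exact pv_bxor_cancel _ _
  have h2 : pvG bits 9 = PySem.List.pyGetD bits 2 0 := by
    rw [show pvG bits 9 = PySem.Int.bxor (pvG bits 2) (pvG bits 5) from rfl]
    simp only [pvG]
    exact pv_bxor_cancel _ _
  have h3 : pvG bits 10 = PySem.List.pyGetD bits 3 0 := by
    rw [show pvG bits 10 = PySem.Int.bxor (pvG bits 3) (pvG bits 6) from rfl]
    simp only [pvG]
    exact pv_bxor_cancel _ _
  have h4 : pvG bits 11 = PySem.List.pyGetD bits 4 0 := by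
    rw [show pvG bits 11 = PySem.Int.bxor (pvG bits 4) (pvG bits 7) from rfl, h0]
    simp only [pvG]
    exact pv_bxor_cancel _ _
  have h5 : pvG bits 12 = PySem.List.pyGetD bits 5 0 := by
    rw [show pvG bits 12 = PySem.Int.bxor (pvG bits 5) (pvG bits 8) from rfl, h1]
    simp only [pvG]
    exact pv_bxor_cancel _ _
  have h6 : pvG bits 13 = PySem.List.pyGetD bits 6 0 := by
    rw [show pvG bits 13 = PySem.Int.bxor (pvG bits 6) (pvG bits 9) from rfl, h2]
    simp only [pvG]
    exact pv_bxor_cancel _ _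
  interval_cases i
  · simpa using h0
  · simpa using h1
  · simpa using h2
  · simpa using h3
  · simpa using h4
  · simpa using h5
  · simpa using h6

theorem pv_loopA (bits : List Int) (l : List Int) :
    ∀ (k : Nat) (acc : List Int),
    (l.foldl
      (fun (st : List Int × List Int) b =>
        let x := st.1
        let feedback := PySem.Int.bxor (PySem.List.pyGetD x 6 0) (PySem.List.pyGetD x 3 0)
        (feedback :: x.dropLast, st.2 ++ [PySem.Int.bxor feedback b]))
      ([pvG bits (k+6), pvG bits (k+5), pvG bits (k+4), pvG bits (k+3),
        pvG bits (k+2), pvG bits (k+1), pvG bits k], acc)).2 = acc ++ pvOut bits k l := by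
  induction l with
  | nil => intro k acc; simp [pvOut]
  | cons b l ih =>
    intro k acc
    have e7 : pvG bits (k+7) = PySem.Int.bxor (pvG bits k) (pvG bits (k+3)) := by simp [pvG]
    rw [List.foldl_cons]
    refine Eq.trans (rfl :
      _ = (List.foldl _ ([PySem.Int.bxor (pvG bits k) (pvG bits (k+3)), pvG bits (k+6),
            pvG bits (k+5), pvG bits (k+4), pvG bits (k+3), pvG bits (k+2), pvG bits (k+1)],
          acc ++ [PySem.Int.bxor (PySem.Int.bxor (pvG bits k) (pvG bits (k+3))) b]) l).2) ?_
    rw [← e7]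
    have hih := ih (k+1) (acc ++ [PySem.Int.bxor (pvG bits (k+7)) b])
    simp only [show k+1+6 = k+7 from by omega, show k+1+5 = k+6 from by omega,
      show k+1+4 = k+5 from by omega, show k+1+3 = k+4 from by omega,
      show k+1+2 = k+3 from by omega, show k+1+1 = k+2 from by omega] at hih
    rw [hih]
    simp [pvOut]

theorem pv_seed_list (bits : List Int) :
    (PySem.List.pyRange 0 7 1).map (fun n => PySem.List.pyGetD bits n 0)
      = (List.range 7).map (fun i => pvG bits (i+7)) := by
  rw [show PySem.List.pyRange 0 7 1 = [0, 1, 2, 3, 4, 5, 6] from by decide,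
    show List.range 7 = [0, 1, 2, 3, 4, 5, 6] from by decide]
  have s0 := pvG_seed bits 0 (by omega)
  have s1 := pvG_seed bits 1 (by omega)
  have s2 := pvG_seed bits 2 (by omega)
  have s3 := pvG_seed bits 3 (by omega)
  have s4 := pvG_seed bits 4 (by omega)
  have s5 := pvG_seed bits 5 (by omega)
  have s6 := pvG_seed bits 6 (by omega)
  norm_num at s0 s1 s2 s3 s4 s5 s6
  simp [s0, s1, s2, s3, s4, s5, s6]

theorem pv_loopB (bits : List Int) :
    ∀ (n k : Nat) (acc : List Int), 7 ≤ k → bits.length - k = n →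
    ((PySem.List.pyRange (k : Int) (bits.length : Int) 1).foldl
      (fun (st : List Int × List Int) n =>
        let fn := PySem.Int.bxor (PySem.List.pyGetD st.1 (n - 4) 0) (PySem.List.pyGetD st.1 (n - 7) 0)
        (st.1 ++ [fn], st.2 ++ [PySem.Int.bxor fn (PySem.List.pyGetD bits n 0)]))
      ((List.range k).map (fun i => pvG bits (i+7)), acc)).2
    = acc ++ pvOut bits k (bits.drop k) := by
  intro n
  induction n with
  | zero =>
    intro k acc hk hn
    rw [show PySem.List.pyRange (k : Int) (bits.length : Int) 1 = [] from by
        simp [PySem.List.pyRange]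
        omega,
      List.drop_eq_nil_of_le (by omega)]
    simp [pvOut]
  | succ m ih =>
    intro k acc hk hn
    have hklen : k < bits.length := by omega
    have e7 : pvG bits (k+7) = PySem.Int.bxor (pvG bits k) (pvG bits (k+3)) := by simp [pvG]
    have h4 : ((k:Int)) - 4 = (((k-4 : Nat)) : Int) := by omega
    have h7 : ((k:Int)) - 7 = (((k-7 : Nat)) : Int) := by omega
    have hg4 : PySem.List.pyGetD ((List.range k).map (fun i => pvG bits (i+7))) ((k:Int) - 4) 0
        = pvG bits (k+3) := by
      rw [h4, PySem.List.pyGetD_natCast, PySem.List.getD_map_range _ _ _ _ (by omega)]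
      congr 1
      omega
    have hg7 : PySem.List.pyGetD ((List.range k).map (fun i => pvG bits (i+7))) ((k:Int) - 7) 0
        = pvG bits k := by
      rw [h7, PySem.List.pyGetD_natCast, PySem.List.getD_map_range _ _ _ _ (by omega)]
      congr 1
      omega
    have hfn : PySem.Int.bxor
        (PySem.List.pyGetD ((List.range k).map (fun i => pvG bits (i+7))) ((k:Int) - 4) 0)
        (PySem.List.pyGetD ((List.range k).map (fun i => pvG bits (i+7))) ((k:Int) - 7) 0)
        = pvG bits (k+7) := by
      rw [hg4, hg7, PySem.Int.bxor_comm, ← e7]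
    have hbk : PySem.List.pyGetD bits ((k:Int)) 0 = bits[k] := by
      rw [PySem.List.pyGetD_natCast, List.getD_eq_getElem?_getD, List.getElem?_eq_getElem hklen]
      rfl
    rw [PySem.List.pyRange_one_cons (by exact_mod_cast hklen), List.foldl_cons]
    change (List.foldl
        (fun (st : List Int × List Int) n =>
          let fn := PySem.Int.bxor (PySem.List.pyGetD st.1 (n - 4) 0) (PySem.List.pyGetD st.1 (n - 7) 0)
          (st.1 ++ [fn], st.2 ++ [PySem.Int.bxor fn (PySem.List.pyGetD bits n 0)]))
        ((List.range k).map (fun i => pvG bits (i+7)) ++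
            [PySem.Int.bxor
              (PySem.List.pyGetD ((List.range k).map (fun i => pvG bits (i+7))) ((k:Int) - 4) 0)
              (PySem.List.pyGetD ((List.range k).map (fun i => pvG bits (i+7))) ((k:Int) - 7) 0)],
         acc ++ [PySem.Int.bxor
            (PySem.Int.bxor
              (PySem.List.pyGetD ((List.range k).map (fun i => pvG bits (i+7))) ((k:Int) - 4) 0)
              (PySem.List.pyGetD ((List.range k).map (fun i => pvG bits (i+7))) ((k:Int) - 7) 0))
            (PySem.List.pyGetD bits ((k:Int)) 0)])
        (PySem.List.pyRange ((k : Int) + 1) (bits.length : Int) 1)).2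
      = acc ++ pvOut bits k (bits.drop k)
    rw [hfn, hbk]
    rw [show ((k:Int)) + 1 = (((k+1 : Nat)) : Int) from by push_cast; ring]
    have hih := ih (k+1) (acc ++ [PySem.Int.bxor (pvG bits (k+7)) bits[k]]) (by omega) (by omega)
    rw [List.range_succ, List.map_append] at hih
    simp only [List.map_cons, List.map_nil] at hih
    rw [hih, List.drop_eq_getElem_cons hklen]
    simp [pvOut]

theorem pv_out_split (bits : List Int) (hlen : 7 ≤ bits.length) :
    ∀ (n j : Nat), j + n = 7 →
    pvOut bits j (bits.drop j) = List.replicate n 0 ++ pvOut bits 7 (bits.drop 7) := by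
  intro n
  induction n with
  | zero =>
    intro j hj
    have : j = 7 := by omega
    subst this
    simp
  | succ m ih =>
    intro j hj
    have hj7 : j < 7 := by omega
    have hjlen : j < bits.length := by omega
    have hb : pvG bits (j+7) = bits[j] := by
      rw [pvG_seed bits j hj7, PySem.List.pyGetD_natCast, List.getD_eq_getElem?_getD,
        List.getElem?_eq_getElem hjlen]
      rfl
    rw [List.drop_eq_getElem_cons hjlen]
    show PySem.Int.bxor (pvG bits (j+7)) bits[j] :: pvOut bits (j+1) (bits.drop (j+1)) = _
    rw [hb, PySem.Int.bxor_self, ih (j+1) (by omega)]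
    simp [List.replicate_succ]

-- ===== VERDICT (by name: the statement is the Claim_ definition above) =====
theorem descramble_spec : Claim_equal_descramble := by
  intro bits _ hpre
  unfold Spec_descramble
  have hlen : 7 ≤ bits.length := hpre
  have hA : descramble bits = pvOut bits 0 bits := by
    have := pv_loopA bits bits 0 []
    simpa [descramble, pvG] using this
  have hB : descramble_alt bits = pvOut bits 0 bits := by
    have hloop := pv_loopB bits (bits.length - 7) 7 (List.replicate 7 0) (by omega) rfl
    simp only [Nat.cast_ofNat] at hloop
    have hsplit := pv_out_split bits hlen 7 0 (by omega)
    rw [List.drop_zero] at hsplit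
    simp only [descramble_alt]
    rw [pv_seed_list bits, hloop, ← hsplit]
  rw [hA, hB]
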